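-- pv_equiv track=rewrite | github.com/ALEJOOYT/CifradoresClasicosWeb | cifradores/transposicionColumna.py | DescifradoFuerzaBruta
-- ===== SOURCE A (Python) =====
-- import math
-- import itertools
--
-- def Descifrar(cifrado, clave):
--     mensaje = ""
--     indiceClave = 0
--     indiceMensaje = 0
--     longitudMensaje = float(len(cifrado))
--     listaMensaje = list(cifrado)
--
--     columnas = len(clave)
--     filas = int(math.ceil(longitudMensaje / columnas))
--     listaClaveOrdenada = sorted(list(clave))
--
--     matrizDescifrado = []
--     for _ in range(filas):
--         matrizDescifrado += [[None] * columnas]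
--
--     for _ in range(columnas):
--         indiceActual = clave.index(listaClaveOrdenada[indiceClave])
--
--         for j in range(filas):
--             matrizDescifrado[j][indiceActual] = listaMensaje[indiceMensaje]
--             indiceMensaje += 1
--         indiceClave += 1
--
--     try:
--         mensaje = ''.join(sum(matrizDescifrado, []))
--     except TypeError:
--         raise TypeError("Este programa no puede manejar palabras repetidas.")
--
--     cantidadRelleno = mensaje.count('_')
--     if cantidadRelleno > 0:
--         return mensaje[: -cantidadRelleno]
--
--     return mensaje
--
-- def DescifradoFuerzaBruta(cifrado, longitudClaveOriginal):
--     numeros = list(range(longitudClaveOriginal))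
--     posiblesPermutaciones = itertools.permutations(numeros)
--     resultados = []
--
--     for permutacion in posiblesPermutaciones:
--         clave = ''.join(chr(65 + num) for num in permutacion)
--         try:
--             textoDescifrado = Descifrar(cifrado, clave)
--             resultados.append({
--                 "permutacion": ''.join(str(num) for num in permutacion),
--                 "textoDescifrado": textoDescifrado
--             })
--         except Exception:
--             continue
--
--     return resultados
-- ===== SOURCE B (Python) =====
-- import itertools
--
-- def DescifradoFuerzaBruta(cifrado, longitudClaveOriginal):
--     n = len(cifrado)
--     resultados = []
--     for perm in itertools.permutations(range(longitudClaveOriginal)):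
--         columnas = len(perm)
--         if columnas == 0 or n % columnas != 0:
--             continue
--         filas = n // columnas
--         columnasTexto = [cifrado[p * filas:(p + 1) * filas] for p in perm]
--         mensaje = ''.join(''.join(fila) for fila in zip(*columnasTexto))
--         relleno = mensaje.count('_')
--         resultados.append({
--             "permutacion": ''.join(str(num) for num in perm),
--             "textoDescifrado": mensaje[:len(mensaje) - relleno],
--         })
--     return resultados
-- ===== Notes on version B (the rewrite author's own statement) =====
-- stated objective: simpler
-- what changed: B drops A's None-filled matrix that is populated cell-by-cell via sorted(clave)+clave.index()+chr keys and instead slices the ciphertext into equal chunks, places chunk perm[c] in column c directly from the permutation tuple, reads rows off with zip, and skips up front any key length that does not divide the text length (where A's fill runs into IndexError).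
import Mathlib
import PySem

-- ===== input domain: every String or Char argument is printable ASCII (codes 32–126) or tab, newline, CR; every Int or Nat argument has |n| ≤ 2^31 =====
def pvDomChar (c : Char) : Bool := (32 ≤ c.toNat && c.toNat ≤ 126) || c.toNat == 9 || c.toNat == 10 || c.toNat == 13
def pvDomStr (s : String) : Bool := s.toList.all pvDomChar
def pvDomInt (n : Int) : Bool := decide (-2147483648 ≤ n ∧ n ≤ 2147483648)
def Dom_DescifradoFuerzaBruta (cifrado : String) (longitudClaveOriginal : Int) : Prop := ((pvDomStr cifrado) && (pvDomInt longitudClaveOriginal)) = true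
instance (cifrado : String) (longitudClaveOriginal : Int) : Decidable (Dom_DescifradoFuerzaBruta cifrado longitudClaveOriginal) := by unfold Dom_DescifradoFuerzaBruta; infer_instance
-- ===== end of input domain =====

-- B replaces A's None-matrix that is filled column-by-column through sorted()+index() with direct
-- slicing: each permutation entry says which ciphertext chunk a column holds, rows are read off by
-- zip; objective: simpler. Equality of RETURN values is what is proved (neither program mutates its
-- arguments).

-- ===== PORT A =====
-- The key string ''.join(chr(65+num) …) is ported as the list of its CODEPOINTS (Ints): the key is
-- only ever sorted (Python sorts characters by codepoint) and searched with .index (equality of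
-- characters = equality of codepoints), so this representation is exact for every key chr can build.
-- chr(i): none where Python's chr raises ValueError (i < 0 or i > 0x10FFFF), the codepoint otherwise.
def pvChr? (i : Int) : Option Int :=
  if 0 ≤ i ∧ i ≤ 1114111 then some i else none

-- inner 'for j in range(filas)' of Descifrar: state (matrizDescifrado, indiceMensaje); none = IndexError
def pvPasoFila (listaMensaje : List Char) (indiceActual : Nat)
    (st : Option (List (List (Option Char)) × Nat)) (j : Nat) :
    Option (List (List (Option Char)) × Nat) :=
  st.bind fun mi =>
    match listaMensaje[mi.2]? with
    | none => none  -- IndexError on listaMensaje[indiceMensaje]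
    | some c => some (mi.1.modify j (fun fila => fila.set indiceActual (some c)), mi.2 + 1)

-- outer 'for _ in range(columnas)' of Descifrar
def pvPasoClave (listaMensaje : List Char) (clave listaClaveOrdenada : List Int) (filas : Nat)
    (st : Option (List (List (Option Char)) × Nat)) (indiceClave : Nat) :
    Option (List (List (Option Char)) × Nat) :=
  st.bind fun mi =>
    match listaClaveOrdenada[indiceClave]? with
    | none => none  -- IndexError on listaClaveOrdenada[indiceClave] (unreachable)
    | some ch =>
      match PySem.List.index? clave ch with
      | none => none  -- ValueError from clave.index (unreachable)
      | some indiceActual => (List.range filas).foldl (pvPasoFila listaMensaje indiceActual) (some mi)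

-- Descifrar: none = any exception (ZeroDivisionError, IndexError, the re-raised TypeError)
def DescifrarA (listaMensaje : List Char) (clave : List Int) : Option (List Char) :=
  let columnas := clave.length
  if columnas = 0 then none  -- ZeroDivisionError in longitudMensaje / columnas
  else
    -- int(math.ceil(len/columnas)); the float division is exact at every size the checks reach
    let filas := (listaMensaje.length + columnas - 1) / columnas
    let listaClaveOrdenada := PySem.List.sorted clave (fun c => c)
    match (List.range columnas).foldl (pvPasoClave listaMensaje clave listaClaveOrdenada filas)
        (some (List.replicate filas (List.replicate columnas (none : Option Char)), 0)) with
    | none => none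
    | some (matriz, _) =>
      match matriz.flatten.mapM id with  -- ''.join(sum(matriz, [])): TypeError (re-raised) if a cell is still None
      | none => none
      | some mensaje =>
        let cantidadRelleno := mensaje.count '_'
        if 0 < cantidadRelleno then
          some (PySem.List.slice mensaje none (some (-(cantidadRelleno : Int))))  -- mensaje[:-cantidadRelleno]
        else some mensaje

def DescifradoFuerzaBruta (cifrado : String) (longitudClaveOriginal : Int) : List (List (String × String)) :=
  let numeros := PySem.List.pyRange 0 longitudClaveOriginal 1
  let posiblesPermutaciones := PySem.List.permutations numeros numeros.length
  posiblesPermutaciones.foldl (fun resultados permutacion =>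
    match permutacion.mapM (fun num => pvChr? (65 + num)) with  -- clave = ''.join(chr(65+num) …)
    | none => resultados  -- chr raised ValueError; the key is built BEFORE A's try, so A raises: outside Pre_
    | some clave =>
      match DescifrarA cifrado.toList clave with
      | none => resultados  -- Descifrar raised; caught by 'except Exception: continue'
      | some texto =>
        resultados ++ [[("permutacion", PySem.Str.join "" (permutacion.map PySem.Int.toStr)),
                        ("textoDescifrado", String.ofList texto)]]) []

-- ===== PORT B =====
-- zip(*columnasTexto): rows of the transpose, truncated at the shortest column
def pvZipRows (cols : List (List Char)) : List (List Char) :=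
  if h : cols ≠ [] ∧ cols.all (fun c => !c.isEmpty) then
    cols.map (fun c => c.headD ' ') :: pvZipRows (cols.map (fun c => c.tail))
  else []
termination_by (cols.headD []).length
decreasing_by
  cases cols with
  | nil => exact absurd rfl h.1
  | cons c rest =>
    have hc : ¬ c.isEmpty := by simpa using List.all_eq_true.mp h.2 c (List.mem_cons_self)
    cases c with
    | nil => simp at hc
    | cons a t => simp

def DescifradoFuerzaBruta_alt (cifrado : String) (longitudClaveOriginal : Int) : List (List (String × String)) :=
  let letras := cifrado.toList
  let n := letras.length
  (PySem.List.permutations (PySem.List.pyRange 0 longitudClaveOriginal 1)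
      (PySem.List.pyRange 0 longitudClaveOriginal 1).length).foldl
    (fun resultados perm =>
      let columnas := perm.length
      if columnas = 0 ∨ PySem.Int.mod (n : Int) (columnas : Int) ≠ 0 then resultados
      else
        let filas : Int := PySem.Int.floordiv (n : Int) (columnas : Int)
        let columnasTexto := perm.map (fun p => PySem.List.slice letras (some (p * filas)) (some ((p + 1) * filas)))
        let mensaje := (pvZipRows columnasTexto).flatten
        let relleno := mensaje.count '_'
        resultados ++ [[("permutacion", PySem.Str.join "" (perm.map PySem.Int.toStr)),
                        ("textoDescifrado", String.ofList (mensaje.take (mensaje.length - relleno)))]]) []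

-- ===== PRECONDITION & SPEC =====
-- Pre_ excludes only longitudClaveOriginal > 0x10FFFF - 64: there chr(65 + num) overflows Python's
-- Unicode range on the very first permutation, and since A builds the key OUTSIDE its try block the
-- ValueError propagates and A raises instead of returning.
def Pre_DescifradoFuerzaBruta (cifrado : String) (longitudClaveOriginal : Int) : Prop :=
  longitudClaveOriginal ≤ 1114047
instance (cifrado : String) (longitudClaveOriginal : Int) : Decidable (Pre_DescifradoFuerzaBruta cifrado longitudClaveOriginal) := by unfold Pre_DescifradoFuerzaBruta; infer_instance

def pvWitness_DescifradoFuerzaBruta : String × Int := ("NALU_ACP", 2)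

def Spec_DescifradoFuerzaBruta (cifrado : String) (longitudClaveOriginal : Int) (out : List (List (String × String))) : Prop := out = DescifradoFuerzaBruta_alt cifrado longitudClaveOriginal
instance (cifrado : String) (longitudClaveOriginal : Int) (out : List (List (String × String))) : Decidable (Spec_DescifradoFuerzaBruta cifrado longitudClaveOriginal out) := by unfold Spec_DescifradoFuerzaBruta; infer_instance

-- ===== CLAIM (what is proved, stated in full; the proofs are below) =====
def Claim_equal_DescifradoFuerzaBruta : Prop := ∀ (cifrado : String) (longitudClaveOriginal : Int), Dom_DescifradoFuerzaBruta cifrado longitudClaveOriginal → Pre_DescifradoFuerzaBruta cifrado longitudClaveOriginal → Spec_DescifradoFuerzaBruta cifrado longitudClaveOriginal (DescifradoFuerzaBruta cifrado longitudClaveOriginal)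

-- ===== LEMMAS AND PROOFS =====

-- the key letter chr(65+num) (its codepoint), as a total function (valid on Pre_'s range)
def pvF (num : Int) : Int := 65 + num

-- the decrypted message: row j of the grid holds, under column c, the j-th letter of chunk perm[c]
def pvMsg (L : List Char) (perm : List Int) (filas : Nat) : List Char :=
  (List.range filas).flatMap (fun j => perm.map (fun p => L.getD (p.toNat * filas + j) ' '))

def pvTrim (msg : List Char) : List Char := msg.take (msg.length - msg.count '_')

-- grid after t outer steps of A's fill loop
def pvMatrix (L : List Char) (perm : List Int) (filas t : Nat) : List (List (Option Char)) :=
  (List.range filas).map (fun j => (List.range perm.length).map (fun c =>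
    if perm.getD c 0 < (t : Int) then some (L.getD ((perm.getD c 0).toNat * filas + j) ' ') else none))

-- A's inner column fill, written as primitive recursion on the row count
def pvFill (L : List Char) (ia : Nat) (M : List (List (Option Char))) (im : Nat) : Nat → List (List (Option Char))
  | 0 => M
  | fl + 1 => (pvFill L ia M im fl).modify fl (fun fila => fila.set ia (some (L.getD (im + fl) ' ')))

lemma mapM_eq_map_of_forall {α β : Type} {l : List α} {g : α → Option β} {f : α → β}
    (h : ∀ x ∈ l, g x = some (f x)) : l.mapM g = some (l.map f) := by
  induction l with
  | nil => rfl
  | cons a t ih =>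
    rw [List.mapM_cons, h a (List.mem_cons_self), ih (fun x hx => h x (List.mem_cons_of_mem a hx))]
    rfl

lemma mapM_id_map_some {α : Type} (l : List α) : (l.map some).mapM id = some l := by
  induction l with
  | nil => rfl
  | cons a t ih => rw [List.map_cons, List.mapM_cons, ih]; rfl

lemma getD_tail {α : Type} (l : List α) (r : Nat) (d : α) : l.tail.getD r d = l.getD (r + 1) d := by
  cases l <;> rfl

lemma headD_eq_getD {α : Type} (l : List α) (d : α) : l.headD d = l.getD 0 d := by
  cases l <;> rfl

lemma index?_map_of_inj {α β : Type} [DecidableEq α] [DecidableEq β] (f : α → β) (l : List α) (v : α)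
    (hinj : ∀ x ∈ l, f x = f v → x = v) :
    PySem.List.index? (l.map f) (f v) = PySem.List.index? l v := by
  induction l with
  | nil => rfl
  | cons a t ih =>
    by_cases ha : a = v
    · subst ha
      rw [PySem.List.index?_cons_self, List.map_cons, PySem.List.index?_cons_self]
    · have hfa : f a ≠ f v := fun he => ha (hinj a (List.mem_cons_self) he)
      rw [List.map_cons, PySem.List.index?_cons_of_ne (List.map f t) hfa,
        PySem.List.index?_cons_of_ne t ha,
        ih (fun x hx => hinj x (List.mem_cons_of_mem a hx))]

lemma map_eq_range_map {α β : Type} (l : List α) (h : α → β) (d : α) :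
    l.map h = (List.range l.length).map (fun c => h (l.getD c d)) := by
  apply List.ext_getElem?
  intro i
  by_cases hi : i < l.length
  · simp [List.getElem?_map, List.getElem?_range, hi, List.getElem?_eq_getElem hi,
      List.getD_eq_getElem?_getD]
  · simp [List.getElem?_map, List.getElem?_range, hi,
      List.getElem?_eq_none (le_of_not_gt hi)]

-- counting invariant of the inner fill loop (used to show a non-divisible length fails)
lemma pvPasoFila_fold_some {L : List Char} {ia fl : Nat} {M : List (List (Option Char))} {im : Nat}
    {x : List (List (Option Char)) × Nat}
    (h : (List.range fl).foldl (pvPasoFila L ia) (some (M, im)) = some x) :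
    x.2 = im + fl ∧ (fl = 0 ∨ x.2 ≤ L.length) := by
  induction fl generalizing x with
  | zero => simp at h; simp [← h]
  | succ fl ih =>
    rw [List.range_succ, List.foldl_append] at h
    cases hmid : (List.range fl).foldl (pvPasoFila L ia) (some (M, im)) with
    | none => rw [hmid] at h; simp [pvPasoFila] at h
    | some y =>
      rw [hmid] at h
      obtain ⟨h1, _⟩ := ih hmid
      simp only [List.foldl_cons, List.foldl_nil, pvPasoFila, Option.bind_some] at h
      cases hy : L[y.2]? with
      | none => simp only [hy] at h; simp at h
      | some c =>
        simp only [hy] at h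
        have hlt : y.2 < L.length := by
          by_contra hge
          rw [List.getElem?_eq_none (le_of_not_gt hge)] at hy; simp at hy
        simp only [Option.some.injEq] at h
        constructor
        · rw [← h]; omega
        · right; rw [← h]; simpa using hlt

lemma pvPasoClave_fold_some {L : List Char} {clave sc : List Int} {fl N : Nat}
    {M0 : List (List (Option Char))} {x : List (List (Option Char)) × Nat}
    (h : (List.range N).foldl (pvPasoClave L clave sc fl) (some (M0, 0)) = some x) :
    x.2 = N * fl ∧ (N = 0 ∨ fl = 0 ∨ x.2 ≤ L.length) := by
  induction N generalizing x with
  | zero => simp at h; simp [← h]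
  | succ N ih =>
    rw [List.range_succ, List.foldl_append] at h
    cases hmid : (List.range N).foldl (pvPasoClave L clave sc fl) (some (M0, 0)) with
    | none => rw [hmid] at h; simp [pvPasoClave] at h
    | some y =>
      rw [hmid] at h
      obtain ⟨h1, _⟩ := ih hmid
      simp only [List.foldl_cons, List.foldl_nil, pvPasoClave, Option.bind_some] at h
      cases hsc : sc[N]? with
      | none => simp only [hsc] at h; simp at h
      | some ch =>
        simp only [hsc] at h
        cases hidx : PySem.List.index? clave ch with
        | none => simp only [hidx] at h; simp at h
        | some ia =>
          simp only [hidx] at h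
          have h' : (List.range fl).foldl (pvPasoFila L ia) (some (y.1, y.2)) = some x := h
          obtain ⟨h2, h3⟩ := pvPasoFila_fold_some h'
          constructor
          · rw [h2, h1]; ring
          · rcases h3 with h3 | h3
            · right; left; exact h3
            · right; right; exact h3

-- A: a length not divisible by the key length always raises IndexError
lemma DescifrarA_none_of_mod {L : List Char} {clave : List Int} (hne : clave.length ≠ 0)
    (hmod : L.length % clave.length ≠ 0) : DescifrarA L clave = none := by
  have hNpos : 0 < clave.length := Nat.pos_of_ne_zero hne
  have hdm := Nat.div_add_mod L.length clave.length
  have hr := Nat.mod_lt L.length hNpos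
  have hgt : L.length < clave.length * ((L.length + clave.length - 1) / clave.length) := by
    have h1 : L.length / clave.length + 1 ≤ (L.length + clave.length - 1) / clave.length := by
      rw [Nat.le_div_iff_mul_le hNpos]
      have he : (L.length / clave.length + 1) * clave.length
          = clave.length * (L.length / clave.length) + clave.length := by ring
      omega
    have h2 := Nat.mul_le_mul_left clave.length h1
    have h3 : clave.length * (L.length / clave.length + 1)
        = clave.length * (L.length / clave.length) + clave.length := by ring
    omega
  simp only [DescifrarA]
  rw [if_neg hne]
  cases hfold : (List.range clave.length).foldl
      (pvPasoClave L clave (PySem.List.sorted clave (fun c => c))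
        ((L.length + clave.length - 1) / clave.length))
      (some (List.replicate ((L.length + clave.length - 1) / clave.length)
        (List.replicate clave.length (none : Option Char)), 0)) with
  | none => rfl
  | some x =>
    exfalso
    obtain ⟨h1, h2⟩ := pvPasoClave_fold_some hfold
    rcases h2 with h2 | h2 | h2
    · omega
    · rw [h2] at hgt; simp at hgt
    · rw [h1] at h2
      omega

-- inner fill loop succeeds and produces pvFill when the reads stay in range
lemma pvPasoFila_fold_eq (L : List Char) (ia : Nat) (M : List (List (Option Char))) (im fl : Nat)
    (h : im + fl ≤ L.length) :
    (List.range fl).foldl (pvPasoFila L ia) (some (M, im)) = some (pvFill L ia M im fl, im + fl) := by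
  induction fl with
  | zero => simp [pvFill]
  | succ fl ih =>
    rw [List.range_succ, List.foldl_append, ih (by omega)]
    have hlt : im + fl < L.length := by omega
    simp only [List.foldl_cons, List.foldl_nil, pvPasoFila, Option.bind_some,
      List.getElem?_eq_getElem hlt]
    have : L[im + fl] = L.getD (im + fl) ' ' := by
      rw [List.getD_eq_getElem?_getD, List.getElem?_eq_getElem hlt]; rfl
    rw [this]; rfl

lemma pvFill_getElem? (L : List Char) (ia : Nat) (M : List (List (Option Char))) (im fl j : Nat) :
    (pvFill L ia M im fl)[j]? =
      if j < fl then (M[j]?).map (fun fila => fila.set ia (some (L.getD (im + j) ' '))) else M[j]? := by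
  induction fl with
  | zero => simp [pvFill]
  | succ fl ih =>
    rw [pvFill, List.getElem?_modify, ih]
    by_cases hj : j < fl
    · have : fl ≠ j := by omega
      simp [hj, this, Nat.lt_succ_of_lt hj]
    · by_cases hj2 : j = fl
      · subst hj2
        simp [hj]
      · have : ¬ j < fl + 1 := by omega
        simp [hj, this, Ne.symm hj2]

-- one outer step sends pvMatrix t to pvMatrix (t+1)
lemma pvFill_matrix_step (L : List Char) (perm : List Int) (filas t ct : Nat)
    (hct : ct < perm.length) (hval : perm.getD ct 0 = (t : Int)) (hnd : perm.Nodup)     :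
    pvFill L ct (pvMatrix L perm filas t) (t * filas) filas = pvMatrix L perm filas (t + 1) := by
  apply List.ext_getElem?
  intro j
  rw [pvFill_getElem?]
  simp only [pvMatrix]
  by_cases hj : j < filas
  · rw [if_pos hj, List.getElem?_map, List.getElem?_map, List.getElem?_range hj,
      Option.map_some, Option.map_some]
    congr 1
    apply List.ext_getElem?
    intro c
    rw [List.getElem?_set]
    by_cases hc : c < perm.length
    · have hcl : c < (List.range perm.length).length := by simpa using hc
      rw [List.getElem?_map, List.getElem?_map, List.getElem?_range hc, Option.map_some, Option.map_some]
      by_cases hcc : ct = c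
      · subst hcc
        rw [if_pos rfl, if_pos (by simpa using hct)]
        have hvt : (perm.getD ct 0).toNat = t := by rw [hval]; exact Int.toNat_natCast t
        have hlt : perm.getD ct 0 < ((t + 1 : Nat) : Int) := by rw [hval]; push_cast; omega
        rw [if_pos hlt, hvt]
      · rw [if_neg hcc]
        congr 1
        have hnet : perm.getD c 0 ≠ (t : Int) := by
          intro he
          apply hcc
          have hinj := List.nodup_iff_injective_getElem.mp hnd
          have h1 : perm[ct] = perm.getD ct 0 := (List.getD_eq_getElem perm 0 hct).symm
          have h2 : perm[c] = perm.getD c 0 := (List.getD_eq_getElem perm 0 hc).symm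
          have h3 : (⟨ct, hct⟩ : Fin perm.length) = ⟨c, hc⟩ := by
            apply hinj
            simp only [h1, h2, hval, he]
          exact congrArg Fin.val h3
        by_cases hlt : perm.getD c 0 < (t : Int)
        · rw [if_pos hlt, if_pos (by push_cast; omega)]
        · rw [if_neg hlt, if_neg (by push_cast; omega)]
    · have hcc : ct ≠ c := by omega
      rw [if_neg hcc]
      have hle : perm.length ≤ c := le_of_not_gt hc
      simp [List.getElem?_eq_none, hle]
  · rw [if_neg hj]
    rw [List.getElem?_eq_none (by simpa using hj), List.getElem?_eq_none (by simpa using hj)]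

-- the outer loop invariant, in the divisible case
lemma pvPasoClave_fold_eq (L : List Char) (perm : List Int) (lco : Int)
    (hperm : perm.Perm (PySem.List.pyRange 0 lco 1)) (hne : perm ≠ [])
    (filas : Nat) (hm : perm.length * filas = L.length) :
    ∀ t, t ≤ perm.length →
      (List.range t).foldl
        (pvPasoClave L (perm.map pvF) (PySem.List.sorted (perm.map pvF) (fun c => c)) filas)
        (some (List.replicate filas (List.replicate perm.length (none : Option Char)), 0)) =
      some (pvMatrix L perm filas t, t * filas) := by
  have hnd : perm.Nodup := (hperm.nodup_iff).mpr (PySem.List.nodup_pyRange_one 0 lco)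
  have hNne : perm.length ≠ 0 := fun h => hne (List.eq_nil_of_length_eq_zero h)
  have hlen : perm.length = lco.toNat := by
    rw [hperm.length_eq, PySem.List.length_pyRange_one]; simp
  have hmem : ∀ p ∈ perm, 0 ≤ p ∧ p < lco := by
    intro p hp
    exact (PySem.List.mem_pyRange_one).mp ((hperm.mem_iff).mp hp)
  have hlcopos : 0 < lco := by omega
  have hsorted : PySem.List.sorted (perm.map pvF) (fun c => c)
      = (PySem.List.pyRange 0 lco 1).map pvF := by
    apply PySem.List.sorted_eq_of_perm_of_pairwise_lt
    · exact (hperm.map pvF).symm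
    · rw [List.pairwise_map]
      apply List.Pairwise.imp_of_mem ?_ (PySem.List.pairwise_lt_pyRange_one 0 lco)
      intro a b _ _ hab
      show pvF a < pvF b
      unfold pvF
      omega
  intro t
  induction t with
  | zero =>
    intro _
    have hbase : pvMatrix L perm filas 0 = List.replicate filas (List.replicate perm.length none) := by
      unfold pvMatrix
      rw [List.eq_replicate_iff]
      refine ⟨by simp, ?_⟩
      intro row hrow
      obtain ⟨j, hj, rfl⟩ := List.mem_map.mp hrow
      rw [List.eq_replicate_iff]
      refine ⟨by simp, ?_⟩
      intro b hb
      obtain ⟨c, hcmem, rfl⟩ := List.mem_map.mp hb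
      have hcN : c < perm.length := List.mem_range.mp hcmem
      rw [if_neg]
      have h0 : 0 ≤ perm.getD c 0 := by
        rw [List.getD_eq_getElem perm 0 hcN]
        exact (hmem _ (List.getElem_mem hcN)).1
      omega
    rw [hbase]
    simp
  | succ t ih =>
    intro ht
    rw [List.range_succ, List.foldl_append, ih (by omega)]
    simp only [List.foldl_cons, List.foldl_nil, pvPasoClave, Option.bind_some]
    have htN : t < perm.length := by omega
    have hsc : (PySem.List.sorted (perm.map pvF) (fun c => c))[t]? = some (pvF (0 + (t : Int))) := by
      rw [hsorted, List.getElem?_map, PySem.List.getElem?_pyRange_one]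
      rw [if_pos (by omega : t < (lco - 0).toNat)]
      rfl
    have hmemt : ((t : Int)) ∈ perm := by
      rw [hperm.mem_iff, PySem.List.mem_pyRange_one]
      constructor
      · omega
      · omega
    have hidx1 : PySem.List.index? (perm.map pvF) (pvF (0 + (t : Int)))
        = PySem.List.index? perm ((t : Int)) := by
      rw [(by omega : (0 : Int) + (t : Int) = (t : Int))]
      apply index?_map_of_inj
      intro x _ hfx
      unfold pvF at hfx
      omega
    obtain ⟨ct, hct⟩ := Option.isSome_iff_exists.mp
      ((PySem.List.index?_isSome_iff perm ((t : Int))).mpr hmemt)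
    obtain ⟨hctlt, hctval, -⟩ := PySem.List.getElem_of_index?_eq_some hct
    simp only [hsc, hidx1, hct]
    have hbound : t * filas + filas ≤ L.length := by
      rw [← hm]
      have : (t + 1) * filas ≤ perm.length * filas := Nat.mul_le_mul_right filas ht
      have he : (t + 1) * filas = t * filas + filas := by ring
      omega
    rw [pvPasoFila_fold_eq L ct _ (t * filas) filas hbound]
    rw [pvFill_matrix_step L perm filas t ct hctlt
      (by rw [List.getD_eq_getElem perm 0 hctlt]; exact hctval) hnd]
    have : t * filas + filas = (t + 1) * filas := by ring
    rw [this]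

-- A's decryption, in the divisible case
lemma DescifrarA_eq_of_dvd (L : List Char) (perm : List Int) (lco : Int)
    (hperm : perm.Perm (PySem.List.pyRange 0 lco 1)) (hne : perm ≠ [])
    (hdvd : L.length % perm.length = 0) :
    DescifrarA L (perm.map pvF) = some (pvTrim (pvMsg L perm (L.length / perm.length))) := by
  have hNne : perm.length ≠ 0 := fun h => hne (List.eq_nil_of_length_eq_zero h)
  have hNpos : 0 < perm.length := Nat.pos_of_ne_zero hNne
  have hdm := Nat.div_add_mod L.length perm.length
  have hm : perm.length * (L.length / perm.length) = L.length := by omega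
  have hmem : ∀ p ∈ perm, 0 ≤ p ∧ p < lco := by
    intro p hp
    exact (PySem.List.mem_pyRange_one).mp ((hperm.mem_iff).mp hp)
  have hfilas : (L.length + perm.length - 1) / perm.length = L.length / perm.length := by
    apply Nat.div_eq_of_lt_le
    · have : L.length / perm.length * perm.length
          = perm.length * (L.length / perm.length) := by ring
      omega
    · have : (L.length / perm.length + 1) * perm.length
          = perm.length * (L.length / perm.length) + perm.length := by ring
      omega
  simp only [DescifrarA, List.length_map]
  rw [if_neg hNne, hfilas,
    pvPasoClave_fold_eq L perm lco hperm hne (L.length / perm.length) hm perm.length le_rfl]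
  have hfull : pvMatrix L perm (L.length / perm.length) perm.length
      = ((List.range (L.length / perm.length)).map (fun j => (List.range perm.length).map
          (fun c => L.getD ((perm.getD c 0).toNat * (L.length / perm.length) + j) ' '))).map
          (List.map some) := by
    unfold pvMatrix
    rw [List.map_map]
    apply List.map_congr_left
    intro j _
    simp only [Function.comp_apply]
    rw [List.map_map]
    apply List.map_congr_left
    intro c hc
    have hcN : c < perm.length := List.mem_range.mp hc
    rw [if_pos]
    · rfl
    · have hb := (hmem _ (List.getElem_mem hcN)).2
      rw [List.getD_eq_getElem perm 0 hcN]
      have hlen : perm.length = lco.toNat := by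
        rw [hperm.length_eq, PySem.List.length_pyRange_one]; simp
      omega
  simp only [hfull, ← List.map_flatten, mapM_id_map_some]
  have hmsg : ((List.range (L.length / perm.length)).map (fun j => (List.range perm.length).map
      (fun c => L.getD ((perm.getD c 0).toNat * (L.length / perm.length) + j) ' '))).flatten
      = pvMsg L perm (L.length / perm.length) := by
    unfold pvMsg
    rw [List.flatMap_def]
    congr 1
    apply List.map_congr_left
    intro j _
    exact (map_eq_range_map perm (fun p => L.getD (p.toNat * (L.length / perm.length) + j) ' ') 0).symm
  rw [hmsg]
  by_cases hcnt : 0 < (pvMsg L perm (L.length / perm.length)).count '_'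
  · rw [if_pos hcnt, PySem.List.slice_to_neg_natCast _ _ hcnt]
    rfl
  · rw [if_neg hcnt]
    have hz : (pvMsg L perm (L.length / perm.length)).count '_' = 0 := by omega
    simp [pvTrim, hz]

-- zip(*cols) when every column has the same length
lemma pvZipRows_eq (f : Nat) : ∀ (cols : List (List Char)), cols ≠ [] →
    (∀ c ∈ cols, c.length = f) →
    pvZipRows cols = (List.range f).map (fun r => cols.map (fun c => c.getD r ' ')) := by
  induction f with
  | zero =>
    intro cols hne hlen
    rw [pvZipRows]
    have : ¬ (cols ≠ [] ∧ cols.all (fun c => !c.isEmpty)) := by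
      rintro ⟨-, hall⟩
      obtain ⟨c, hc⟩ := List.exists_mem_of_ne_nil cols hne
      have := List.all_eq_true.mp hall c hc
      have hcn : c.length = 0 := hlen c hc
      simp [List.isEmpty_iff, List.length_eq_zero_iff.mp hcn] at this
    rw [dif_neg this]; simp
  | succ f ih =>
    intro cols hne hlen
    rw [pvZipRows]
    have hall : cols ≠ [] ∧ cols.all (fun c => !c.isEmpty) := by
      refine ⟨hne, List.all_eq_true.mpr fun c hc => ?_⟩
      have := hlen c hc
      simp [List.isEmpty_iff]
      intro h; rw [h] at this; simp at this
    rw [dif_pos hall]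
    have htne : cols.map (fun c => c.tail) ≠ [] := by simpa using hne
    have htlen : ∀ c ∈ cols.map (fun c => c.tail), c.length = f := by
      intro c hc
      obtain ⟨c0, hc0, rfl⟩ := List.mem_map.mp hc
      have := hlen c0 hc0
      simp [List.length_tail, this]
    rw [ih _ htne htlen, List.range_succ_eq_map, List.map_cons, List.map_map]
    congr 1
    · exact List.map_congr_left fun c _ => headD_eq_getD c ' '
    · apply List.map_congr_left
      intro r _
      rw [List.map_map]
      exact List.map_congr_left fun c _ => getD_tail c r ' '

-- B's slicing reconstruction produces the same message as A's grid
lemma alt_mensaje_eq (L : List Char) (perm : List Int) (lco : Int)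
    (hperm : perm.Perm (PySem.List.pyRange 0 lco 1)) (hne : perm ≠ [])
    (hdvd : L.length % perm.length = 0) :
    (pvZipRows (perm.map (fun p => PySem.List.slice L
        (some (p * PySem.Int.floordiv (L.length : Int) (perm.length : Int)))
        (some ((p + 1) * PySem.Int.floordiv (L.length : Int) (perm.length : Int)))))).flatten
      = pvMsg L perm (L.length / perm.length) := by
  have hNne : perm.length ≠ 0 := fun h => hne (List.eq_nil_of_length_eq_zero h)
  have hdm := Nat.div_add_mod L.length perm.length
  have hm : perm.length * (L.length / perm.length) = L.length := by omega
  have hlen : perm.length = lco.toNat := by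
    rw [hperm.length_eq, PySem.List.length_pyRange_one]; simp
  have hmem : ∀ p ∈ perm, 0 ≤ p ∧ p < lco := by
    intro p hp
    exact (PySem.List.mem_pyRange_one).mp ((hperm.mem_iff).mp hp)
  have hfd : PySem.Int.floordiv (L.length : Int) (perm.length : Int)
      = ((L.length / perm.length : Nat) : Int) := PySem.Int.floordiv_natCast _ _
  have hcols : perm.map (fun p => PySem.List.slice L
        (some (p * PySem.Int.floordiv (L.length : Int) (perm.length : Int)))
        (some ((p + 1) * PySem.Int.floordiv (L.length : Int) (perm.length : Int))))
      = perm.map (fun p => (L.drop (p.toNat * (L.length / perm.length))).take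
          (L.length / perm.length)) := by
    apply List.map_congr_left
    intro p hp
    obtain ⟨hp0, hpl⟩ := hmem p hp
    rw [hfd]
    have h1 : p * ((L.length / perm.length : Nat) : Int)
        = ((p.toNat * (L.length / perm.length) : Nat) : Int) := by
      push_cast [Int.toNat_of_nonneg hp0]; ring
    have h2 : (p + 1) * ((L.length / perm.length : Nat) : Int)
        = ((p.toNat * (L.length / perm.length) : Nat) : Int)
          + ((L.length / perm.length : Nat) : Int) := by
      push_cast [Int.toNat_of_nonneg hp0]; ring
    rw [h1, h2, PySem.List.slice_natCast_add]
  rw [hcols]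
  have hlencols : ∀ c ∈ perm.map (fun p =>
      (L.drop (p.toNat * (L.length / perm.length))).take (L.length / perm.length)),
      c.length = L.length / perm.length := by
    intro c hc
    obtain ⟨p, hp, rfl⟩ := List.mem_map.mp hc
    obtain ⟨hp0, hpl⟩ := hmem p hp
    have hpN : p.toNat < perm.length := by omega
    have hin : p.toNat * (L.length / perm.length) + L.length / perm.length ≤ L.length := by
      have h3 : (p.toNat + 1) * (L.length / perm.length)
          ≤ perm.length * (L.length / perm.length) := Nat.mul_le_mul_right _ hpN
      have h4 : (p.toNat + 1) * (L.length / perm.length)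
          = p.toNat * (L.length / perm.length) + L.length / perm.length := by ring
      omega
    simp only [List.length_take, List.length_drop]
    omega
  have hcne : perm.map (fun p =>
      (L.drop (p.toNat * (L.length / perm.length))).take (L.length / perm.length)) ≠ [] := by
    simpa using hne
  rw [pvZipRows_eq _ _ hcne hlencols]
  unfold pvMsg
  rw [List.flatMap_def]
  congr 1
  apply List.map_congr_left
  intro r hr
  have hrf : r < L.length / perm.length := List.mem_range.mp hr
  rw [List.map_map]
  apply List.map_congr_left
  intro p hp
  simp only [Function.comp_apply]
  rw [List.getD_eq_getElem?_getD, List.getD_eq_getElem?_getD, List.getElem?_take, if_pos hrf,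
    List.getElem?_drop]

-- ===== VERDICT (by name: the statement is the Claim_ definition above) =====
theorem DescifradoFuerzaBruta_spec : Claim_equal_DescifradoFuerzaBruta := by
  intro cifrado lco _ hpre
  unfold Spec_DescifradoFuerzaBruta
  simp only [DescifradoFuerzaBruta, DescifradoFuerzaBruta_alt]
  apply PySem.List.foldl_congr_mem
  intro acc perm hpmem
  have hperm : perm.Perm (PySem.List.pyRange 0 lco 1) :=
    PySem.List.perm_of_mem_permutations hpmem
  rcases eq_or_ne perm [] with rfl | hne
  · simp [DescifrarA]
  · have hNne : perm.length ≠ 0 := fun h => hne (List.eq_nil_of_length_eq_zero h)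
    have hmem : ∀ p ∈ perm, 0 ≤ p ∧ p < lco := fun p hp =>
      (PySem.List.mem_pyRange_one).mp ((hperm.mem_iff).mp hp)
    have hpre' : lco ≤ 1114047 := hpre
    have hkey : perm.mapM (fun num => pvChr? (65 + num)) = some (perm.map pvF) := by
      apply mapM_eq_map_of_forall
      intro x hx
      obtain ⟨hx0, hxl⟩ := hmem x hx
      unfold pvChr? pvF
      rw [if_pos ⟨by omega, by omega⟩]
    by_cases hdvd : cifrado.toList.length % perm.length = 0
    · simp only [hkey, DescifrarA_eq_of_dvd cifrado.toList perm lco hperm hne hdvd]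
      have hge : ¬ (((perm.length : Int) = 0)
          ∨ PySem.Int.mod (cifrado.toList.length : Int) (perm.length : Int) ≠ 0) := by
        push_neg
        refine ⟨by exact_mod_cast hNne, ?_⟩
        rw [PySem.Int.mod_natCast, hdvd]
        rfl
      rw [if_neg hge, alt_mensaje_eq cifrado.toList perm lco hperm hne hdvd]
      rfl
    · simp only [hkey, DescifrarA_none_of_mod (L := cifrado.toList) (clave := perm.map pvF)
        (by simpa using hNne) (by simpa using hdvd)]
      have hgt : (((perm.length : Int) = 0)
          ∨ PySem.Int.mod (cifrado.toList.length : Int) (perm.length : Int) ≠ 0) := by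
        right
        rw [PySem.Int.mod_natCast]
        exact_mod_cast hdvd
      rw [if_pos hgt]
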